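-- pv_equiv track=rewrite | github.com/AndrewDul/smart-desk-ai-assistant | modules/services/response_streamer.py | _split_for_display
-- ===== SOURCE A (Python) =====
-- def _split_for_display(text: str) -> list[str]:
--     separators = [". ", "! ", "? ", ", ", "; ", ": "]
--     parts = [text]
--
--     for separator in separators:
--         updated: list[str] = []
--         for part in parts:
--             updated.extend(segment.strip() for segment in part.split(separator) if segment.strip())
--         parts = updated
--
--     return [part.strip() for part in parts if part.strip()]
-- ===== SOURCE B (Python) =====
-- # Alternative implementation: depth-first recursion per segment (emit results
-- # directly) instead of rebuilding six whole intermediate lists, with a manual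
-- # find-based cut loop instead of str.split.
-- def _split_for_display(text: str) -> list[str]:
--     separators = (". ", "! ", "? ", ", ", "; ", ": ")
--     out: list[str] = []
--
--     def emit(piece: str, k: int) -> None:
--         if k == len(separators):
--             out.append(piece)
--             return
--         sep = separators[k]
--         rest = piece
--         idx = rest.find(sep)
--         while idx != -1:
--             seg = rest[:idx].strip()
--             if seg:
--                 emit(seg, k + 1)
--             rest = rest[idx + 2:]
--             idx = rest.find(sep)
--         seg = rest.strip()
--         if seg:
--             emit(seg, k + 1)
--
--     emit(text, 0)
--     return out
-- ===== Notes on version B (the rewrite author's own statement) =====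
-- stated objective: alternative
-- what changed: A makes six breadth-first passes, each rebuilding the whole list of parts with str.split; B does one depth-first recursion over the separator list per segment, cutting with an explicit find/slice loop and emitting final segments directly, never materializing the six intermediate lists.
import Mathlib
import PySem

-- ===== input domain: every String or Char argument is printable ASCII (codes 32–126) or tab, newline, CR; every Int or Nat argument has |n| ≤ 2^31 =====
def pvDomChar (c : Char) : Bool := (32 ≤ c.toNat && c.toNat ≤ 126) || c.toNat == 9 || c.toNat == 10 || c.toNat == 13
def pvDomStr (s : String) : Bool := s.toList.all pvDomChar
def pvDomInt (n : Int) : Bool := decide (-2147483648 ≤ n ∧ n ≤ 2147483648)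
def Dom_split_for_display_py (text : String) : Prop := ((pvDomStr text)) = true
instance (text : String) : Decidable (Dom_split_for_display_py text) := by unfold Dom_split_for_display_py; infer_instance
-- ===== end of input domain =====

-- B replaces A's six successive whole-list rebuilding passes (one str.split pass per
-- separator) by a single depth-first recursion that cuts each segment with a manual
-- find loop and emits the final segments directly (objective: alternative).

-- ===== PORT A =====
def split_for_display_py (text : String) : List String :=
  let separators : List (List Char) :=
    [". ".toList, "! ".toList, "? ".toList, ", ".toList, "; ".toList, ": ".toList]
  let parts : List (List Char) :=
    separators.foldl
      (fun parts separator =>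
        parts.foldl
          (fun updated part =>
            updated ++
              ((PySem.Chars.splitOn part separator).map PySem.Chars.strip).filter
                (fun seg => seg ≠ []))
          [])
      [text.toList]
  ((parts.map PySem.Chars.strip).filter (fun part => part ≠ [])).map String.ofList

-- ===== PORT B =====
mutual
  def emitB (seps : List (List Char)) (piece : List Char) : List String :=
    match seps with
    | [] => [String.ofList piece]
    | sep :: rest => loopB rest sep piece
  termination_by (seps.length, 0, 0)

  -- the while loop of Source B, as a recursion producing the emitted strings in order
  def loopB (seps : List (List Char)) (sep rest : List Char) : List String :=
    let idx := PySem.Chars.find rest sep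
    if idx = -1 then
      let seg := PySem.Chars.strip rest
      if seg = [] then [] else emitB seps seg
    else
      let seg := PySem.Chars.strip (PySem.Chars.slice rest none (some idx))
      (if seg = [] then [] else emitB seps seg) ++
        (if rest = [] then []  -- totality guard, unreachable: find of a nonempty sep never hits []
         else loopB seps sep (PySem.Chars.slice rest (some (idx + 2)) none))
  termination_by (seps.length, 1, rest.length)
  decreasing_by
    · exact Prod.Lex.right _ (Prod.Lex.left _ _ (by omega))
    · exact Prod.Lex.right _ (Prod.Lex.left _ _ (by omega))
    · apply Prod.Lex.right
      apply Prod.Lex.right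
      have hge : -1 ≤ PySem.Chars.find rest sep := PySem.Chars.neg_one_le_find rest sep
      have h0 : 0 ≤ PySem.Chars.find rest sep := by omega
      have hlen : 0 < rest.length := List.length_pos_iff.mpr (by assumption)
      rw [PySem.Chars.slice_eq_listSlice,
        show PySem.Chars.find rest sep + 2 = (((PySem.Chars.find rest sep).toNat + 2 : Nat) : Int) by omega,
        PySem.List.slice_some_none, PySem.List.clampIdx_natCast]
      simp only [List.length_drop]
      omega
end

def split_for_display_py_alt (text : String) : List String :=
  emitB [". ".toList, "! ".toList, "? ".toList, ", ".toList, "; ".toList, ": ".toList]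
    text.toList

-- ===== PRECONDITION & SPEC =====
def Spec_split_for_display_py (text : String) (out : List String) : Prop := out = split_for_display_py_alt text
instance (text : String) (out : List String) : Decidable (Spec_split_for_display_py text out) := by unfold Spec_split_for_display_py; infer_instance

-- ===== CLAIM (what is proved, stated in full; the proofs are below) =====
def Claim_equal_split_for_display_py : Prop := ∀ (text : String), Dom_split_for_display_py text → Spec_split_for_display_py text (split_for_display_py text)

-- ===== LEMMAS AND PROOFS =====

-- A's one pass over the parts list, for one separator
def stageA (parts : List (List Char)) (sep : List Char) : List (List Char) :=
  parts.foldl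
    (fun updated part =>
      updated ++
        ((PySem.Chars.splitOn part sep).map PySem.Chars.strip).filter
          (fun seg => seg ≠ []))
    []

-- find-based reference splitting (the shape B's loop follows)
def splitFind (sep l : List Char) : List (List Char) :=
  let i := PySem.Chars.find l sep
  if i = -1 ∨ sep = [] then [l]
  else l.take i.toNat :: splitFind sep (l.drop (i.toNat + sep.length))
termination_by l.length
decreasing_by
  rename_i h
  rw [not_or] at h
  obtain ⟨h1, h2⟩ := h
  have hs := PySem.Chars.findFrom_natCast_spec l sep 0 (by omega)
    (by rw [Nat.cast_zero, PySem.Chars.findFrom_zero]; exact h1)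
  rw [Nat.cast_zero, PySem.Chars.findFrom_zero] at hs
  have hpre := hs.2.1.length_le
  simp only [List.length_drop] at hpre ⊢
  have : 0 < sep.length := List.length_pos_iff.mpr h2
  omega

def mapConsHd (x : List Char) : List (List Char) → List (List Char)
  | [] => [x]
  | a :: as => (x ++ a) :: as

theorem find_spec (l sep : List Char) (h : PySem.Chars.find l sep ≠ -1) :
    0 ≤ PySem.Chars.find l sep ∧ sep <+: l.drop (PySem.Chars.find l sep).toNat ∧
      ∀ i : Nat, i < (PySem.Chars.find l sep).toNat → ¬ sep <+: l.drop i := by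
  have hs := PySem.Chars.findFrom_natCast_spec l sep 0 (by omega)
    (by rw [Nat.cast_zero, PySem.Chars.findFrom_zero]; exact h)
  rw [Nat.cast_zero, PySem.Chars.findFrom_zero] at hs
  exact ⟨by exact_mod_cast hs.1, hs.2.1, fun i hi => hs.2.2 i (by omega) hi⟩

theorem find_of_prefix {l sep : List Char} (h : sep <+: l) :
    PySem.Chars.find l sep = 0 := by
  have hne : PySem.Chars.find l sep ≠ -1 := by
    rw [Ne, PySem.Chars.find_eq_neg_one_iff]
    exact fun hc => hc h.isInfix
  obtain ⟨h0, hpre, hmin⟩ := find_spec l sep hne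
  by_contra hc
  have ht : 0 < (PySem.Chars.find l sep).toNat := by omega
  exact hmin 0 ht (by simpa using h)

theorem find_nil_of_ne {sep : List Char} (hsep : sep ≠ []) :
    PySem.Chars.find [] sep = -1 := by
  rw [PySem.Chars.find_eq_neg_one_iff, List.infix_nil]
  exact hsep

theorem find_cons_of_not_prefix {c : Char} {rest sep : List Char}
    (h : ¬ sep <+: (c :: rest)) :
    PySem.Chars.find (c :: rest) sep =
      if PySem.Chars.find rest sep = -1 then -1 else PySem.Chars.find rest sep + 1 := by
  split_ifs with hg
  · rw [PySem.Chars.find_eq_neg_one_iff] at hg ⊢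
    rw [List.infix_cons_iff]
    tauto
  · obtain ⟨hg0, hgpre, hgmin⟩ := find_spec rest sep hg
    have hinf : PySem.Chars.find (c :: rest) sep ≠ -1 := by
      rw [Ne, PySem.Chars.find_eq_neg_one_iff]
      intro hc
      exact hc (List.infix_cons_iff.mpr (Or.inr (hgpre.isInfix.trans (List.drop_suffix _ _).isInfix)))
    obtain ⟨hf0, hfpre, hfmin⟩ := find_spec (c :: rest) sep hinf
    have hfne : (PySem.Chars.find (c :: rest) sep).toNat ≠ 0 := by
      intro h0
      rw [h0] at hfpre
      exact h (by simpa using hfpre)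
    have hle : (PySem.Chars.find (c :: rest) sep).toNat ≤ (PySem.Chars.find rest sep).toNat + 1 := by
      by_contra hc
      exact hfmin ((PySem.Chars.find rest sep).toNat + 1) (by omega) (by simpa using hgpre)
    have hge : (PySem.Chars.find rest sep).toNat + 1 ≤ (PySem.Chars.find (c :: rest) sep).toNat := by
      by_contra hc
      have h1 : (PySem.Chars.find (c :: rest) sep).toNat - 1 < (PySem.Chars.find rest sep).toNat := by omega
      apply hgmin _ h1
      have h2 : sep <+: (c :: rest).drop ((PySem.Chars.find (c :: rest) sep).toNat - 1 + 1) := by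
        rw [show (PySem.Chars.find (c :: rest) sep).toNat - 1 + 1 = (PySem.Chars.find (c :: rest) sep).toNat by omega]
        exact hfpre
      simpa using h2
    omega

theorem splitFind_ne_nil (sep l : List Char) : splitFind sep l ≠ [] := by
  rw [splitFind]
  split_ifs <;> simp

theorem splitFind_nil {sep : List Char} (hsep : sep ≠ []) : splitFind sep [] = [[]] := by
  rw [splitFind]; simp [find_nil_of_ne hsep]

theorem mapConsHd_nil_of_ne_nil {Y : List (List Char)} (h : Y ≠ []) : mapConsHd [] Y = Y := by
  cases Y with
  | nil => exact absurd rfl h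
  | cons a as => simp [mapConsHd]

theorem mapConsHd_mapConsHd (x : List Char) (c : Char) (Y : List (List Char)) :
    mapConsHd x (mapConsHd [c] Y) = mapConsHd (x ++ [c]) Y := by
  cases Y <;> simp [mapConsHd]

theorem splitFind_cons {c : Char} {rest sep : List Char} (hsep : sep ≠ [])
    (h : ¬ sep <+: (c :: rest)) :
    splitFind sep (c :: rest) = mapConsHd [c] (splitFind sep rest) := by
  conv_lhs => rw [splitFind]
  rw [find_cons_of_not_prefix h]
  by_cases hg : PySem.Chars.find rest sep = -1
  · have hr : splitFind sep rest = [rest] := by rw [splitFind]; simp [hg]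
    simp [hg, hr, mapConsHd]
  · have hg0 : 0 ≤ PySem.Chars.find rest sep := by
      have := PySem.Chars.neg_one_le_find rest sep; omega
    have hne : ¬ (PySem.Chars.find rest sep + 1 = -1) := by omega
    have hr : splitFind sep rest =
        rest.take (PySem.Chars.find rest sep).toNat ::
          splitFind sep (rest.drop ((PySem.Chars.find rest sep).toNat + sep.length)) := by
      conv_lhs => rw [splitFind]
      simp [hg, hsep]
    rw [hr]
    have ht : (PySem.Chars.find rest sep + 1).toNat = (PySem.Chars.find rest sep).toNat + 1 := by
      omega
    simp only [hg, if_false, hne, hsep, or_self, mapConsHd, ht, List.take_succ_cons,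
      show (PySem.Chars.find rest sep).toNat + 1 + sep.length
          = ((PySem.Chars.find rest sep).toNat + sep.length) + 1 by omega,
      List.drop_succ_cons, List.singleton_append]

theorem splitOn_go_eq (sep : List Char) (hsep : sep ≠ []) :
    ∀ (fuel : Nat) (l cur : List Char) (acc : List (List Char)), l.length ≤ fuel →
      PySem.Chars.splitOn.go sep fuel l cur acc =
        acc.reverse ++ mapConsHd cur.reverse (splitFind sep l) := by
  intro fuel
  induction fuel with
  | zero =>
    intro l cur acc hl
    have hn : l = [] := by cases l <;> simp_all
    subst hn
    rw [PySem.Chars.splitOn.go, splitFind_nil hsep]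
    simp [mapConsHd]
  | succ n ih =>
    intro l cur acc hl
    cases l with
    | nil =>
      rw [PySem.Chars.splitOn.go, splitFind_nil hsep] <;> simp [mapConsHd]
    | cons c rest =>
      rw [PySem.Chars.splitOn.go]
      by_cases hp : sep.isPrefixOf (c :: rest)
      · simp only [hp, if_true]
        have hpre : sep <+: (c :: rest) := List.isPrefixOf_iff_prefix.mp hp
        have hslen : 0 < sep.length := List.length_pos_iff.mpr hsep
        have hdl : (List.drop sep.length (c :: rest)).length ≤ n := by
          simp only [List.length_drop, List.length_cons] at hl ⊢
          omega
        rw [ih _ [] _ hdl]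
        have hfind : PySem.Chars.find (c :: rest) sep = 0 := find_of_prefix hpre
        have hsf : splitFind sep (c :: rest) =
            [] :: splitFind sep ((c :: rest).drop sep.length) := by
          conv_lhs => rw [splitFind]
          simp [hfind, hsep]
        rw [hsf]
        simp only [List.reverse_nil]
        rw [mapConsHd_nil_of_ne_nil (splitFind_ne_nil _ _)]
        simp [mapConsHd]
      · simp only [hp]
        have hr : rest.length ≤ n := by simp only [List.length_cons] at hl; omega
        rw [ih rest (c :: cur) acc hr,
          splitFind_cons hsep (fun hc => hp (List.isPrefixOf_iff_prefix.mpr hc)),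
          mapConsHd_mapConsHd, List.reverse_cons]
        simp

theorem splitOn_eq_splitFind {l sep : List Char} (hsep : sep ≠ []) :
    PySem.Chars.splitOn l sep = splitFind sep l := by
  rw [PySem.Chars.splitOn, splitOn_go_eq sep hsep (l.length + 1) l [] [] (by omega)]
  cases h : splitFind sep l with
  | nil => exact absurd h (splitFind_ne_nil sep l)
  | cons a as => simp [mapConsHd]

theorem loopB_eq (seps : List (List Char)) (sep : List Char) (h2 : sep.length = 2) :
    ∀ l, loopB seps sep l =
      (splitFind sep l).flatMap
        (fun seg => if PySem.Chars.strip seg = [] then [] else emitB seps (PySem.Chars.strip seg)) := by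
  have hsep : sep ≠ [] := by intro h; rw [h] at h2; simp at h2
  suffices H : ∀ n (l : List Char), l.length ≤ n → loopB seps sep l =
      (splitFind sep l).flatMap
        (fun seg => if PySem.Chars.strip seg = [] then [] else emitB seps (PySem.Chars.strip seg)) by
    intro l; exact H l.length l le_rfl
  intro n
  induction n with
  | zero =>
    intro l hl
    have hn : l = [] := by cases l <;> simp_all
    subst hn
    rw [loopB, splitFind_nil hsep]
    simp [find_nil_of_ne hsep]
  | succ n ih =>
    intro l hl
    by_cases hf : PySem.Chars.find l sep = -1
    · rw [loopB]
      conv_rhs => rw [splitFind]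
      simp [hf]
    · obtain ⟨hf0, hfpre, -⟩ := find_spec l sep hf
      have hlen : (PySem.Chars.find l sep).toNat + 2 ≤ l.length := by
        have hple := hfpre.length_le
        simp only [List.length_drop] at hple
        omega
      have hne : l ≠ [] := by intro h; subst h; simp at hlen
      rw [loopB]
      simp only [hf, if_false, hne, PySem.Chars.slice_eq_listSlice]
      rw [PySem.List.slice_to _ hf0,
        show PySem.Chars.find l sep + 2 = (((PySem.Chars.find l sep).toNat + 2 : Nat) : Int) by omega,
        PySem.List.slice_some_none, PySem.List.clampIdx_natCast,
        show min ((PySem.Chars.find l sep).toNat + 2) l.length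
            = (PySem.Chars.find l sep).toNat + 2 by omega]
      rw [ih _ (by simp only [List.length_drop]; omega)]
      conv_rhs => rw [splitFind]
      simp only [hf, hsep, or_self, if_false, h2, List.flatMap_cons]

theorem flatMap_filter_strip (l : List (List Char)) (g : List Char → List String) :
    (((l.map PySem.Chars.strip).filter (fun seg => seg ≠ [])).flatMap g) =
      l.flatMap (fun seg => if PySem.Chars.strip seg = [] then [] else g (PySem.Chars.strip seg)) := by
  induction l with
  | nil => simp
  | cons a as ih =>
    rw [List.map_cons, List.filter_cons, List.flatMap_cons]
    by_cases h : PySem.Chars.strip a = []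
    · rw [if_neg (by simp [h]), ih, if_pos h, List.nil_append]
    · rw [if_pos (by simp [h]), List.flatMap_cons, ih, if_neg h]

theorem main_foldl (seps : List (List Char)) (h2 : ∀ s ∈ seps, s.length = 2) :
    ∀ parts : List (List Char),
      (seps.foldl stageA parts).map String.ofList = parts.flatMap (fun p => emitB seps p) := by
  induction seps with
  | nil =>
    intro parts
    rw [List.foldl_nil]
    simp only [emitB]
    exact List.map_eq_flatMap (f := String.ofList) (l := parts)
  | cons s ss ih =>
    intro parts
    have hs : s.length = 2 := h2 s (by simp)
    have hsep : s ≠ [] := by intro h; rw [h] at hs; simp at hs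
    rw [List.foldl_cons, ih (fun t ht => h2 t (by simp [ht]))]
    rw [show stageA parts s =
        parts.flatMap (fun part =>
          ((PySem.Chars.splitOn part s).map PySem.Chars.strip).filter (fun seg => seg ≠ []))
      from by rw [stageA]; exact PySem.List.foldl_append_eq_flatMap _ parts []]
    rw [List.flatMap_assoc]
    apply List.flatMap_congr
    intro p _
    conv_rhs => rw [emitB]
    rw [loopB_eq ss s hs p, ← splitOn_eq_splitFind hsep, ← flatMap_filter_strip]

theorem dropWhile_head_false {p : Char → Bool} {y : List Char} (hy : y.dropWhile p = y) :
    ∀ c z, y = c :: z → p c = false := by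
  intro c z hcz
  subst hcz
  by_cases hc : p c
  · rw [List.dropWhile_cons_of_pos hc] at hy
    have h1 := List.length_dropWhile_le p z
    have h2 := congrArg List.length hy
    simp at h2
    omega
  · simpa using hc

theorem lstrip_rstrip_of_lstripped (p : Char → Bool) (y : List Char) (hy : y.dropWhile p = y) :
    ((y.reverse.dropWhile p).reverse).dropWhile p = (y.reverse.dropWhile p).reverse := by
  have hpref : (y.reverse.dropWhile p).reverse <+: y := by
    conv_rhs => rw [show y = y.reverse.reverse by rw [List.reverse_reverse]]
    rw [List.reverse_prefix]
    exact List.dropWhile_suffix p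
  cases hR : (y.reverse.dropWhile p).reverse with
  | nil => simp
  | cons d z =>
    rw [hR] at hpref
    obtain ⟨t, ht⟩ := hpref
    cases y with
    | nil => simp at ht
    | cons e ys =>
      have hde : d = e := by
        simp only [List.cons_append, List.cons.injEq] at ht
        exact ht.1
      have hpe : p e = false := dropWhile_head_false hy e ys rfl
      rw [List.dropWhile_cons_of_neg (by rw [hde, hpe]; simp)]

theorem strip_idem (x : List Char) : PySem.Chars.strip (PySem.Chars.strip x) = PySem.Chars.strip x := by
  simp only [PySem.Chars.strip, PySem.Chars.lstrip, PySem.Chars.rstrip]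
  rw [lstrip_rstrip_of_lstripped PySem.Chars.isspace (x.dropWhile PySem.Chars.isspace)
    (List.dropWhile_idempotent _ _)]
  rw [List.reverse_reverse, List.dropWhile_idempotent]

theorem good_stage (parts : List (List Char)) (sep : List Char) :
    ∀ x ∈ stageA parts sep, PySem.Chars.strip x = x ∧ x ≠ [] := by
  intro x hx
  rw [stageA, PySem.List.foldl_append_eq_flatMap _ parts []] at hx
  simp only [List.nil_append, List.mem_flatMap, List.mem_filter, List.mem_map] at hx
  obtain ⟨p, _, ⟨⟨seg, _, hseg⟩, hne⟩⟩ := hx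
  refine ⟨by rw [← hseg]; exact strip_idem seg, by simpa using hne⟩

theorem good_foldl (seps : List (List Char)) (hne : seps ≠ []) (parts : List (List Char)) :
    ∀ x ∈ seps.foldl stageA parts, PySem.Chars.strip x = x ∧ x ≠ [] := by
  induction seps generalizing parts with
  | nil => exact absurd rfl hne
  | cons s ss ih =>
    intro x hx
    rw [List.foldl_cons] at hx
    rcases hss : ss with _ | ⟨t, ts⟩
    · subst hss
      exact good_stage parts s x (by simpa using hx)
    · exact ih (by simp [hss]) (stageA parts s) x hx

theorem filter_strip_id (l : List (List Char))
    (h : ∀ x ∈ l, PySem.Chars.strip x = x ∧ x ≠ []) :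
    ((l.map PySem.Chars.strip).filter (fun part => part ≠ [])) = l := by
  induction l with
  | nil => simp
  | cons a as ih =>
    obtain ⟨ha1, ha2⟩ := h a (by simp)
    simp only [List.map_cons, List.filter_cons, ha1]
    rw [if_pos (by simpa using ha2), ih (fun x hx => h x (by simp [hx]))]

theorem main_eq (text : String) : split_for_display_py text = split_for_display_py_alt text := by
  have h6 : ∀ s ∈ [". ".toList, "! ".toList, "? ".toList, ", ".toList, "; ".toList, ": ".toList],
      s.length = 2 := by decide
  have good := good_foldl
    [". ".toList, "! ".toList, "? ".toList, ", ".toList, "; ".toList, ": ".toList]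
    (by simp) [text.toList]
  calc split_for_display_py text
      = ((([". ".toList, "! ".toList, "? ".toList, ", ".toList, "; ".toList, ": ".toList].foldl
            stageA [text.toList]).map PySem.Chars.strip).filter
          (fun part => part ≠ [])).map String.ofList := rfl
    _ = ([". ".toList, "! ".toList, "? ".toList, ", ".toList, "; ".toList, ": ".toList].foldl
            stageA [text.toList]).map String.ofList := by
          rw [filter_strip_id _ good]
    _ = [text.toList].flatMap
          (fun p => emitB [". ".toList, "! ".toList, "? ".toList, ", ".toList, "; ".toList, ": ".toList] p) := by
          rw [main_foldl _ h6]
    _ = split_for_display_py_alt text := by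
          simp [split_for_display_py_alt]

-- ===== VERDICT (by name: the statement is the Claim_ definition above) =====
theorem split_for_display_py_spec : Claim_equal_split_for_display_py := by
  intro text _
  unfold Spec_split_for_display_py
  exact main_eq text
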